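-- pv_equiv track=rewrite | github.com/zsmoore/BucketSortExperiments | gas_station_problem/python/bucket_solution.py | gen_buckets
-- ===== SOURCE A (Python) =====
-- MILEAGE = 50
--
-- def gen_buckets(mileage_list):
--     buckets = {}
--     for station in mileage_list:
--         dist = station // MILEAGE
--         if dist in buckets:
--             buckets[dist].append(station)
--         else:
--             buckets[dist] = [station]
--
--     return buckets
-- ===== SOURCE B (Python) =====
-- MILEAGE = 50
--
-- def gen_buckets(mileage_list):
--     dists = [s // MILEAGE for s in mileage_list]
--     keys = list(dict.fromkeys(dists))
--     return {d: [s for s, dd in zip(mileage_list, dists) if dd == d] for d in keys}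
-- ===== Notes on version B (the rewrite author's own statement) =====
-- stated objective: alternative
-- what changed: Instead of incrementally appending into a dict during one pass, B first computes the distinct bucket keys in order of first appearance and then builds each bucket with a per-key filter pass over the zipped input.
import Mathlib
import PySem

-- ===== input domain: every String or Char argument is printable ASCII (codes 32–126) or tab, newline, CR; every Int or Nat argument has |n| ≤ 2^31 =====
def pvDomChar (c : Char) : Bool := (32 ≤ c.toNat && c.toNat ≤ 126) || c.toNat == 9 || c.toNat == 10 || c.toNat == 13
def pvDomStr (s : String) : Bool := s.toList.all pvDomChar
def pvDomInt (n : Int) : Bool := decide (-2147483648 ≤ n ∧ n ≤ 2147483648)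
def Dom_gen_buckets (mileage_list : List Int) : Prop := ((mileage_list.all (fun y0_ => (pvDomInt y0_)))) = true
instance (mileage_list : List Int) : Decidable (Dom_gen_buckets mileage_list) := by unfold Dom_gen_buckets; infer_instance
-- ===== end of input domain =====

-- B replaces A's incremental append-into-a-dict pass by computing the ordered distinct keys first
-- and building each bucket with a per-key filter pass (objective: alternative decomposition, same results).

-- ===== PORT A =====
def gen_buckets (mileage_list : List Int) : List (Int × List Int) :=
  (mileage_list.foldl (fun buckets station =>
      let dist := PySem.Int.floordiv station 50
      if buckets.contains dist then
        buckets.modify dist [] (fun l => l ++ [station])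
      else
        buckets.insert dist [station])
    PySem.Dict.empty).items

-- ===== PORT B =====
def gen_buckets_alt (mileage_list : List Int) : List (Int × List Int) :=
  let dists := mileage_list.map (fun s => PySem.Int.floordiv s 50)
  let keys := PySem.List.dedup dists
  keys.map (fun d =>
    (d, ((mileage_list.zip dists).filter (fun p => p.2 == d)).map (fun p => p.1)))

-- ===== PRECONDITION & SPEC =====
def Spec_gen_buckets (mileage_list : List Int) (out : List (Int × List Int)) : Prop := out = gen_buckets_alt mileage_list
instance (mileage_list : List Int) (out : List (Int × List Int)) : Decidable (Spec_gen_buckets mileage_list out) := by unfold Spec_gen_buckets; infer_instance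

-- ===== CLAIM (what is proved, stated in full; the proofs are below) =====
def Claim_equal_gen_buckets : Prop := ∀ (mileage_list : List Int), Dom_gen_buckets mileage_list → Spec_gen_buckets mileage_list (gen_buckets mileage_list)

-- ===== LEMMAS AND PROOFS =====

-- On a key not yet present, A's else-branch insert is exactly what a modify-with-default does.
theorem pv_modify_of_not_contains {κ ν : Type} [BEq κ] [LawfulBEq κ]
    (d : PySem.Dict κ ν) (k : κ) (dflt : ν) (f : ν → ν)
    (h : d.contains k = false) : d.modify k dflt f = d.insert k (f dflt) := by
  simp [PySem.Dict.modify, PySem.Dict.getD_of_not_contains (h := h)]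

-- A's loop body is the uniform modify step, branch or no branch.
theorem pv_loopA_eq_modify (xs : List Int) (d : PySem.Dict Int (List Int)) :
    xs.foldl (fun buckets station =>
      let dist := PySem.Int.floordiv station 50
      if buckets.contains dist then
        buckets.modify dist [] (fun l => l ++ [station])
      else
        buckets.insert dist [station]) d
    = xs.foldl (fun buckets station =>
        buckets.modify (PySem.Int.floordiv station 50) [] (fun l => l ++ [station])) d := by
  apply PySem.List.foldl_congr_mem
  intro b s _
  by_cases h : b.contains (PySem.Int.floordiv s 50)
  · simp only [h, if_true]
  · simp only [Bool.not_eq_true] at h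
    simp only [h, Bool.false_eq_true, if_false, pv_modify_of_not_contains (h := h),
      List.nil_append]

-- zip(xs, [f(x) for x in xs]) pairs each element with its key.
theorem pv_zip_self_map {α β : Type} (xs : List α) (g : α → β) :
    xs.zip (xs.map g) = xs.map (fun a => (a, g a)) := by
  induction xs with
  | nil => rfl
  | cons x t ih => simp [ih]

theorem gen_buckets_eq (xs : List Int) : gen_buckets xs = gen_buckets_alt xs := by
  unfold gen_buckets gen_buckets_alt
  rw [pv_loopA_eq_modify]
  have hnd : (xs.foldl (fun buckets station =>
      buckets.modify (PySem.Int.floordiv station 50) [] (fun l => l ++ [station]))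
      PySem.Dict.empty).keys.Nodup :=
    PySem.Dict.nodup_keys_foldl_modify_key xs (fun s => PySem.Int.floordiv s 50) []
      (fun _ s l => l ++ [s]) PySem.Dict.empty PySem.Dict.nodup_keys_empty
  rw [PySem.Dict.items_eq_map_keys _ hnd []]
  rw [PySem.Dict.keys_foldl_modify_key]
  have hpairs : xs.foldl (fun buckets station =>
      buckets.modify (PySem.Int.floordiv station 50) [] (fun l => l ++ [station]))
      PySem.Dict.empty
      = (xs.map (fun s => (PySem.Int.floordiv s 50, s))).foldl
          (fun d p => d.modify p.1 [] (fun l => l ++ [p.2])) PySem.Dict.empty := by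
    rw [List.foldl_map]
  apply List.map_congr_left
  intro c _
  refine Prod.ext rfl ?_
  show (xs.foldl _ PySem.Dict.empty).getD c [] = _
  rw [hpairs, PySem.Dict.getD_foldl_modify_append, pv_zip_self_map]
  simp [List.filter_map, List.map_map, Function.comp_def]

-- ===== VERDICT (by name: the statement is the Claim_ definition above) =====
theorem gen_buckets_spec : Claim_equal_gen_buckets := by
  intro xs _
  show gen_buckets xs = gen_buckets_alt xs
  exact gen_buckets_eq xs
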